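-- pv_equiv track=rewrite | github.com/JacksonWang99/Python | Project_2/polygons(6).py | _check
-- ===== SOURCE A (Python) =====
-- def _check(pc, contour_tmp):
--     x_pc = pc[0]
--     y_pc = pc[1]
--     UDLR = [0, 0, 0, 0]
--     contour_tmp.append(contour_tmp[0])
--     for p in contour_tmp:
--         if UDLR == [1, 1, 1, 1]:
--             return True
--         else:
--             x_p = p[0]
--             y_p = p[1]
--             if x_p == x_pc and y_p > y_pc:
--                 UDLR[0] = 1
--             elif x_p == x_pc and y_p < y_pc:
--                 UDLR[1] = 1
--             elif x_p > x_pc and y_p == y_pc: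
--                 UDLR[2] = 1
--             elif x_p < x_pc and y_p == y_pc:
--                 UDLR[3] = 1
--     return False
-- ===== SOURCE B (Python) =====
-- def _check(pc, contour_tmp):
--     contour_tmp.append(contour_tmp[0])
--     x_pc, y_pc = pc[0], pc[1]
--     return (any(p[0] == x_pc and p[1] > y_pc for p in contour_tmp)
--             and any(p[0] == x_pc and p[1] < y_pc for p in contour_tmp)
--             and any(p[0] > x_pc and p[1] == y_pc for p in contour_tmp)
--             and any(p[0] < x_pc and p[1] == y_pc for p in contour_tmp))
-- ===== Notes on version B (the rewrite author's own statement) =====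
-- stated objective: simpler
-- what changed: Replaces the single flag-accumulating loop with a mid-loop early-return check by four independent short-circuiting any-scans, one per direction (the argument-mutating append is kept).
-- outside the precondition, e.g. on _check([0, 0], [[0, 1], [0, -1], [1, 0], [-1, 0], [5]]): A returns True, B returns True
import Mathlib
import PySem

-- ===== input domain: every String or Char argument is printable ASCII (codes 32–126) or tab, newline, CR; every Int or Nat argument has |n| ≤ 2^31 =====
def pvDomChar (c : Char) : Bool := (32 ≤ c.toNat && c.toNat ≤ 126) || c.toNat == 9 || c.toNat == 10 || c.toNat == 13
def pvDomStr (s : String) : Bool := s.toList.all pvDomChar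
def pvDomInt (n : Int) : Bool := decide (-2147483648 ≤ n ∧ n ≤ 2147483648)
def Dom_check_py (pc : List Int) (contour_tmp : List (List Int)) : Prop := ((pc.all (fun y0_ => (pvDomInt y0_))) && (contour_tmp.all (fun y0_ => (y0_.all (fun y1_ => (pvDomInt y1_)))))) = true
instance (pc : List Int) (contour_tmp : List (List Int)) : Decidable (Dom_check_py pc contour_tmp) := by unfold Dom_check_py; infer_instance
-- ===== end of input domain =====

-- B replaces A's single flag-accumulating loop by four independent any-scans (one per
-- direction); same O(n) cost, simpler decomposition. Both A and B append contour_tmp[0]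
-- to the contour_tmp argument in place; the equivalence proved is about the return value.


-- ===== PORT A =====
-- one step of A's if/elif chain on the flag list UDLR (Python raises on a short point;
-- the port leaves the flags unchanged there — such inputs are outside Pre_check_py)
def checkUpd (x_pc y_pc : Int) (UDLR : List Int) (p : List Int) : List Int :=
  match PySem.List.pyGet? p 0, PySem.List.pyGet? p 1 with
  | some x_p, some y_p =>
    if x_p = x_pc ∧ y_p > y_pc then UDLR.set 0 1
    else if x_p = x_pc ∧ y_p < y_pc then UDLR.set 1 1
    else if x_p > x_pc ∧ y_p = y_pc then UDLR.set 2 1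
    else if x_p < x_pc ∧ y_p = y_pc then UDLR.set 3 1
    else UDLR
  | _, _ => UDLR

-- A's for-loop: check the flags before each element, update, return False at the end
def checkLoop (x_pc y_pc : Int) : List (List Int) → List Int → Bool
  | [], _ => false
  | p :: rest, UDLR =>
    if UDLR = [1, 1, 1, 1] then true
    else checkLoop x_pc y_pc rest (checkUpd x_pc y_pc UDLR p)

def check_py (pc : List Int) (contour_tmp : List (List Int)) : Bool :=
  match PySem.List.pyGet? pc 0, PySem.List.pyGet? pc 1, PySem.List.pyGet? contour_tmp 0 with
  | some _, some _, some h0 =>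
    match PySem.List.pyGet? pc 0, PySem.List.pyGet? pc 1 with
    | some x_pc, some y_pc =>
      checkLoop x_pc y_pc (contour_tmp ++ [h0]) [0, 0, 0, 0]
    | _, _ => false
  | _, _, _ => false

-- ===== PORT B =====
-- the four generator conditions of Source B: p[0]==x_pc and p[1]>y_pc, etc.
def dirUp (x_pc y_pc : Int) (p : List Int) : Bool :=
  match PySem.List.pyGet? p 0, PySem.List.pyGet? p 1 with
  | some a, some b => a == x_pc && decide (b > y_pc)
  | _, _ => false
def dirDown (x_pc y_pc : Int) (p : List Int) : Bool :=
  match PySem.List.pyGet? p 0, PySem.List.pyGet? p 1 with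
  | some a, some b => a == x_pc && decide (b < y_pc)
  | _, _ => false
def dirRight (x_pc y_pc : Int) (p : List Int) : Bool :=
  match PySem.List.pyGet? p 0, PySem.List.pyGet? p 1 with
  | some a, some b => decide (a > x_pc) && b == y_pc
  | _, _ => false
def dirLeft (x_pc y_pc : Int) (p : List Int) : Bool :=
  match PySem.List.pyGet? p 0, PySem.List.pyGet? p 1 with
  | some a, some b => decide (a < x_pc) && b == y_pc
  | _, _ => false

def check_py_alt (pc : List Int) (contour_tmp : List (List Int)) : Bool :=
  match PySem.List.pyGet? contour_tmp 0 with
  | some h0 =>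
    let ct := contour_tmp ++ [h0]
    match PySem.List.pyGet? pc 0, PySem.List.pyGet? pc 1 with
    | some x_pc, some y_pc =>
      ct.any (dirUp x_pc y_pc) && ct.any (dirDown x_pc y_pc) &&
      ct.any (dirRight x_pc y_pc) && ct.any (dirLeft x_pc y_pc)
    | _, _ => false
  | _ => false

-- ===== PRECONDITION & SPEC =====
-- Pre_ restricts to well-formed input: pc with ≥ 2 coordinates and a nonempty contour of
-- 2-D points (each point ≥ 2 coordinates). On ragged contours the two programs raise on
-- different points (A indexes p[1] unconditionally; B's short-circuiting scans may skip a
-- short point): where BOTH return they agree (True), but B can return False where A raises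
-- IndexError; see claim.json cites/raises.
def Pre_check_py (pc : List Int) (contour_tmp : List (List Int)) : Prop :=
  2 ≤ pc.length ∧ contour_tmp ≠ [] ∧ ∀ p ∈ contour_tmp, 2 ≤ p.length
instance (pc : List Int) (contour_tmp : List (List Int)) : Decidable (Pre_check_py pc contour_tmp) := by unfold Pre_check_py; infer_instance

def pvWitness_check_py : List Int × List (List Int) := ([0, 0], [[0, 1], [0, -1], [1, 0], [-1, 0]])

def Spec_check_py (pc : List Int) (contour_tmp : List (List Int)) (out : Bool) : Prop := out = check_py_alt pc contour_tmp
instance (pc : List Int) (contour_tmp : List (List Int)) (out : Bool) : Decidable (Spec_check_py pc contour_tmp out) := by unfold Spec_check_py; infer_instance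

-- ===== CLAIM (what is proved, stated in full; the proofs are below) =====
def Claim_equal_check_py : Prop := ∀ (pc : List Int) (contour_tmp : List (List Int)), Dom_check_py pc contour_tmp → Pre_check_py pc contour_tmp → Spec_check_py pc contour_tmp (check_py pc contour_tmp)

-- ===== LEMMAS AND PROOFS =====

-- encode four boolean flags as A's flag list
def encFlags (u d l r : Bool) : List Int :=
  [if u then 1 else 0, if d then 1 else 0, if l then 1 else 0, if r then 1 else 0]

theorem encFlags_eq_ones (u d l r : Bool) :
    (encFlags u d l r = [1, 1, 1, 1]) ↔ (u ∧ d ∧ l ∧ r) := by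
  cases u <;> cases d <;> cases l <;> cases r <;> simp [encFlags]

-- one update step acts on the encoded flags componentwise (the four direction
-- predicates are mutually exclusive, so the elif chain sets exactly the right flag)
theorem checkUpd_enc (x y : Int) (u d l r : Bool) (p : List Int) :
    checkUpd x y (encFlags u d l r) p =
      encFlags (u || dirUp x y p) (d || dirDown x y p)
               (l || dirRight x y p) (r || dirLeft x y p) := by
  unfold checkUpd dirUp dirDown dirRight dirLeft
  cases h0 : PySem.List.pyGet? p 0 with
  | none => simp
  | some a =>
    cases h1 : PySem.List.pyGet? p 1 with
    | none => simp
    | some b =>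
      simp only
      rcases lt_trichotomy a x with hax | rfl | hax
      · rcases lt_trichotomy b y with hby | rfl | hby
        · simp [encFlags, hax, hby, ne_of_lt hax, ne_of_lt hby,
                lt_asymm hax, lt_asymm hby]
        · simp [encFlags, List.set, hax, ne_of_lt hax, lt_asymm hax]
        · simp [encFlags, hax, hby, ne_of_lt hax, ne_of_gt hby,
                lt_asymm hax, lt_asymm hby]
      · rcases lt_trichotomy b y with hby | rfl | hby
        · simp [encFlags, List.set, hby, lt_asymm hby]
        · simp [encFlags]
        · simp [encFlags, hby, lt_asymm hby]
      · rcases lt_trichotomy b y with hby | rfl | hby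
        · simp [encFlags, hax, hby, ne_of_gt hax, ne_of_lt hby,
                lt_asymm hax, lt_asymm hby]
        · simp [encFlags, List.set, hax, ne_of_gt hax, lt_asymm hax]
        · simp [encFlags, hax, hby, ne_of_gt hax, ne_of_gt hby,
                lt_asymm hax, lt_asymm hby]

theorem foldl_checkUpd_enc (x y : Int) (ct : List (List Int)) (u d l r : Bool) :
    ct.foldl (checkUpd x y) (encFlags u d l r) =
      encFlags (u || ct.any (dirUp x y)) (d || ct.any (dirDown x y))
               (l || ct.any (dirRight x y)) (r || ct.any (dirLeft x y)) := by
  induction ct generalizing u d l r with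
  | nil => simp
  | cons p rest ih =>
    simp [List.foldl_cons, checkUpd_enc, ih, Bool.or_assoc]

theorem checkUpd_ones (x y : Int) (p : List Int) :
    checkUpd x y [1, 1, 1, 1] p = [1, 1, 1, 1] := by
  rw [show ([1, 1, 1, 1] : List Int) = encFlags true true true true from rfl, checkUpd_enc]
  rfl

theorem foldl_checkUpd_ones (x y : Int) (l : List (List Int)) :
    l.foldl (checkUpd x y) [1, 1, 1, 1] = [1, 1, 1, 1] := by
  induction l with
  | nil => rfl
  | cons p rest ih => simp [List.foldl_cons, checkUpd_ones, ih]

-- A's loop returns true iff the flags are complete after the last-but-one element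
theorem checkLoop_true_iff (x y : Int) (l : List (List Int)) (fl : List Int) :
    checkLoop x y l fl = true ↔
      (l ≠ [] ∧ l.dropLast.foldl (checkUpd x y) fl = [1, 1, 1, 1]) := by
  induction l generalizing fl with
  | nil => simp [checkLoop]
  | cons p rest ih =>
    unfold checkLoop
    by_cases hfl : fl = [1, 1, 1, 1]
    · subst hfl
      cases rest with
      | nil => simp
      | cons q t =>
        simp [List.dropLast, List.foldl_cons, checkUpd_ones, foldl_checkUpd_ones]
    · rw [if_neg hfl, ih]
      cases rest with
      | nil => simp [hfl]
      | cons q t => simp [List.dropLast]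

theorem any_append_head {α : Type} (ct : List α) (h0 : α) (hm : h0 ∈ ct) (f : α → Bool) :
    (ct ++ [h0]).any f = ct.any f := by
  simp only [List.any_append, List.any_cons, List.any_nil, Bool.or_false]
  cases hf : f h0
  · simp
  · have hany : ct.any f = true := List.any_eq_true.mpr ⟨h0, hm, hf⟩
    simp [hany]

-- ===== VERDICT (by name: the statement is the Claim_ definition above) =====
theorem check_py_spec : Claim_equal_check_py := by
  intro pc ct _ hpre
  obtain ⟨hpc, hct, _⟩ := hpre
  unfold Spec_check_py check_py check_py_alt
  obtain ⟨x, y, rest, hpcE⟩ : ∃ x y rest, pc = x :: y :: rest := by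
    cases pc with
    | nil => simp at hpc
    | cons a t =>
      cases t with
      | nil => simp at hpc
      | cons b u => exact ⟨a, b, u, rfl⟩
  obtain ⟨h0, crest, hctE⟩ := List.exists_cons_of_ne_nil hct
  subst hpcE hctE
  have hg0 : PySem.List.pyGet? (x :: y :: rest) (0 : Int) = some x :=
    PySem.List.pyGet?_zero_cons x (y :: rest)
  have hg1 : PySem.List.pyGet? (x :: y :: rest) (1 : Int) = some y := by
    rw [show (1 : Int) = ((1 : Nat) : Int) by norm_num, PySem.List.pyGet?_natCast]; simp
  have hgc : PySem.List.pyGet? (h0 :: crest) (0 : Int) = some h0 :=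
    PySem.List.pyGet?_zero_cons h0 crest
  simp only [hg0, hg1, hgc]
  have hmem : h0 ∈ h0 :: crest := List.mem_cons_self
  have hinit : ([0, 0, 0, 0] : List Int) = encFlags false false false false := by rfl
  rw [Bool.eq_iff_iff, checkLoop_true_iff, List.dropLast_concat, hinit,
      foldl_checkUpd_enc, encFlags_eq_ones]
  rw [any_append_head _ _ hmem, any_append_head _ _ hmem,
      any_append_head _ _ hmem, any_append_head _ _ hmem]
  simp [Bool.and_eq_true, and_assoc]
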